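-- pv_equiv track=rewrite | github.com/Gerax5/COM-AC1 | sim.py | procesar_buffer
-- ===== SOURCE A (Python) =====
-- def procesar_buffer(buffer, buffer_acumulado):
--     startIndex = 0
--     currentIndex = 0
--     lexemas = []
--
--     if buffer_acumulado:
--         buffer = buffer_acumulado + buffer
--         buffer_acumulado.clear()
--
--     while currentIndex < len(buffer):
--         if buffer[currentIndex] == " " or buffer[currentIndex] == "eof":
--             lexema = "".join(buffer[startIndex:currentIndex])
--             if lexema:
--                 lexemas.append(lexema)
--             startIndex = currentIndex + 1
--
--         currentIndex += 1
--
--     if startIndex < len(buffer) and " " not in buffer[startIndex:]: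
--         buffer_acumulado.extend(buffer[startIndex:])
--
--     return lexemas, buffer_acumulado
-- ===== SOURCE B (Python) =====
-- def procesar_buffer(buffer, buffer_acumulado):
--     # Single pass with a running `current` token instead of index/slice scanning.
--     # Mutates buffer_acumulado (clear + extend) like A does.
--     tokens = buffer_acumulado + buffer
--     buffer_acumulado.clear()
--     lexemas = []
--     current = []
--     for el in tokens:
--         if el == " " or el == "eof":
--             lexema = "".join(current)
--             if lexema:
--                 lexemas.append(lexema)
--             current = []
--         else:
--             current.append(el)
--     if current:
--         buffer_acumulado.extend(current)
--     return lexemas, buffer_acumulado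
-- ===== Notes on version B (the rewrite author's own statement) =====
-- stated objective: simpler
-- what changed: Replaces the index/slice scan (startIndex/currentIndex, repeated slicing and a final '" " in tail' membership re-scan) with a single structural pass that accumulates the current token element-by-element; the leftover is the accumulator itself, no slicing or re-scan.
import Mathlib
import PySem

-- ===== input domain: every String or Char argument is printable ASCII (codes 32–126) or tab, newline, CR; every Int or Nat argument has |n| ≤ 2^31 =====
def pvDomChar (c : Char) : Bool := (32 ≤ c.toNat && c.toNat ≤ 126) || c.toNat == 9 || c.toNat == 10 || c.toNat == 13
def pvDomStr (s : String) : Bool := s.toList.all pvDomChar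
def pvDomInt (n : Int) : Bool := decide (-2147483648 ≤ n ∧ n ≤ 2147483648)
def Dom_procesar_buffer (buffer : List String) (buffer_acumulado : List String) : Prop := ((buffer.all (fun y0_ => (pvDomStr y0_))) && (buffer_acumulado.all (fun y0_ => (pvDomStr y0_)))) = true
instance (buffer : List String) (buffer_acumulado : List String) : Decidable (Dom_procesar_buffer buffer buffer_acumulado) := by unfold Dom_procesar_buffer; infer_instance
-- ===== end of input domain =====

-- B replaces A's index/slice scan by a single pass with a running `current` token (objective: simpler).
-- A mutates buffer_acumulado in place (clear/extend); B performs the same mutation; the theorems are about the return value.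

-- ===== PORT A =====
-- the while loop: state (startIndex, currentIndex, lexemas); returns final (startIndex, lexemas)
def pbLoopA (b : List String) (startIndex currentIndex : Nat) (lexemas : List String) :
    Nat × List String :=
  if currentIndex < b.length then
    if b.getD currentIndex "" == " " || b.getD currentIndex "" == "eof" then
      let lexema := PySem.Str.join "" (PySem.List.slice b (some (startIndex : Int)) (some (currentIndex : Int)))
      pbLoopA b (currentIndex + 1) (currentIndex + 1)
        (if lexema ≠ "" then lexemas ++ [lexema] else lexemas)
    else
      pbLoopA b startIndex (currentIndex + 1) lexemas
  else
    (startIndex, lexemas)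
termination_by b.length - currentIndex

def procesar_buffer (buffer : List String) (buffer_acumulado : List String) : List String × List String :=
  let b := if buffer_acumulado ≠ [] then buffer_acumulado ++ buffer else buffer
  let acum := if buffer_acumulado ≠ [] then ([] : List String) else buffer_acumulado
  let r := pbLoopA b 0 0 []
  let tail := PySem.List.slice b (some (r.1 : Int)) none
  let acum2 := if r.1 < b.length ∧ " " ∉ tail then acum ++ tail else acum
  (r.2, acum2)

-- ===== PORT B =====
-- the for loop: state (current, lexemas); returns final (lexemas, current)
def pbLoopB (xs : List String) (current lexemas : List String) : List String × List String :=
  match xs with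
  | [] => (lexemas, current)
  | el :: rest =>
    if el == " " || el == "eof" then
      let lexema := PySem.Str.join "" current
      pbLoopB rest [] (if lexema ≠ "" then lexemas ++ [lexema] else lexemas)
    else
      pbLoopB rest (current ++ [el]) lexemas

def procesar_buffer_alt (buffer : List String) (buffer_acumulado : List String) : List String × List String :=
  let tokens := buffer_acumulado ++ buffer
  let r := pbLoopB tokens [] []
  (r.1, if r.2 ≠ [] then r.2 else [])

-- ===== PRECONDITION & SPEC =====
def Spec_procesar_buffer (buffer : List String) (buffer_acumulado : List String) (out : List String × List String) : Prop := out = procesar_buffer_alt buffer buffer_acumulado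
instance (buffer : List String) (buffer_acumulado : List String) (out : List String × List String) : Decidable (Spec_procesar_buffer buffer buffer_acumulado out) := by unfold Spec_procesar_buffer; infer_instance

-- ===== CLAIM (what is proved, stated in full; the proofs are below) =====
def Claim_equal_procesar_buffer : Prop := ∀ (buffer : List String) (buffer_acumulado : List String), Dom_procesar_buffer buffer buffer_acumulado → Spec_procesar_buffer buffer buffer_acumulado (procesar_buffer buffer buffer_acumulado)

-- ===== LEMMAS AND PROOFS =====

-- Main invariant: running A's indexed loop from (start, cur) corresponds to running B's loop
-- on the remaining elements with `current` = the slice b[start:cur], provided that slice holds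
-- no delimiter; the final `start` points at a delimiter-free tail equal to B's final `current`.
theorem pbLoop_agree (b : List String) :
    ∀ (n start cur : Nat) (lex : List String),
      cur + n = b.length → start ≤ cur →
      (∀ x ∈ (b.drop start).take (cur - start), ¬(x = " " ∨ x = "eof")) →
      (pbLoopB (b.drop cur) ((b.drop start).take (cur - start)) lex
        = ((pbLoopA b start cur lex).2, b.drop (pbLoopA b start cur lex).1))
      ∧ (∀ x ∈ b.drop (pbLoopA b start cur lex).1, ¬(x = " " ∨ x = "eof"))
      ∧ (pbLoopA b start cur lex).1 ≤ b.length := by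
  intro n
  induction n with
  | zero =>
    intro start cur lex hlen hsc hcl
    have hcur : cur = b.length := by omega
    rw [pbLoopA, if_neg (by omega)]
    have hdrop : b.drop cur = [] := List.drop_eq_nil_of_le (by omega)
    have htake : (b.drop start).take (cur - start) = b.drop start := by
      apply List.take_of_length_le
      rw [List.length_drop]; omega
    refine ⟨?_, ?_, by omega⟩
    · rw [hdrop, pbLoopB, htake]
    · intro x hx
      apply hcl
      rw [htake]
      exact hx
  | succ m ih =>
    intro start cur lex hlen hsc hcl
    have hcur : cur < b.length := by omega
    have hget : b.getD cur "" = b[cur] := List.getD_eq_getElem b "" hcur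
    have hdropcur : b.drop cur = b[cur] :: b.drop (cur + 1) :=
      List.drop_eq_getElem_cons hcur
    rw [pbLoopA]
    simp only [hcur, if_true]
    by_cases hdel : (b.getD cur "" == " " || b.getD cur "" == "eof") = true
    · -- delimiter case
      simp only [hdel, if_true]
      have hslice : PySem.List.slice b (some (start : Int)) (some (cur : Int))
          = (b.drop start).take (cur - start) := PySem.List.slice_natCast b start cur
      have h2 := ih (cur + 1) (cur + 1)
        (if PySem.Str.join "" (PySem.List.slice b (some (start : Int)) (some (cur : Int))) ≠ "" then
          lex ++ [PySem.Str.join "" (PySem.List.slice b (some (start : Int)) (some (cur : Int)))] else lex)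
        (by omega) (le_refl _) (by simp)
      refine ⟨?_, h2.2.1, h2.2.2⟩
      rw [hdropcur, pbLoopB]
      have hdelx : (b[cur] == " " || b[cur] == "eof") = true := by rw [← hget]; exact hdel
      simp only [hdelx, if_true]
      rw [← h2.1]
      simp [hslice]
    · -- non-delimiter case
      simp only [hdel]
      have hx : ¬(b[cur] = " " ∨ b[cur] = "eof") := by
        intro h
        apply hdel
        rw [hget]
        rcases h with h | h <;> rw [h] <;> decide
      have hcl' : ∀ x ∈ (b.drop start).take (cur + 1 - start), ¬(x = " " ∨ x = "eof") := by
        have hstep : (b.drop start).take (cur + 1 - start)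
            = (b.drop start).take (cur - start) ++ [b[cur]] := by
          have hlt : cur - start < (b.drop start).length := by
            rw [List.length_drop]; omega
          have hgetd : (b.drop start)[cur - start] = b[cur] := by
            rw [List.getElem_drop]
            congr 1; omega
          have : cur + 1 - start = (cur - start) + 1 := by omega
          rw [this, List.take_add_one, List.getElem?_eq_getElem hlt, hgetd]
          rfl
        rw [hstep]
        intro x hx'
        rcases List.mem_append.mp hx' with h | h
        · exact hcl x h
        · simp at h; rw [h]; exact hx
      have h2 := ih start (cur + 1) lex (by omega) (by omega) hcl'
      refine ⟨?_, h2.2.1, h2.2.2⟩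
      rw [hdropcur, pbLoopB]
      have hdelx : (b[cur] == " " || b[cur] == "eof") = false := by
        rw [← hget]
        exact Bool.not_eq_true _ ▸ hdel
      simp only [hdelx, Bool.false_eq_true, if_false]
      rw [← h2.1]
      congr 1
      have hlt : cur - start < (b.drop start).length := by
        rw [List.length_drop]; omega
      have hgetd : (b.drop start)[cur - start] = b[cur] := by
        rw [List.getElem_drop]; congr 1; omega
      have : cur + 1 - start = (cur - start) + 1 := by omega
      rw [this, List.take_add_one, List.getElem?_eq_getElem hlt, hgetd]
      rfl

theorem procesar_buffer_eq (buffer buffer_acumulado : List String) :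
    procesar_buffer buffer buffer_acumulado = procesar_buffer_alt buffer buffer_acumulado := by
  unfold procesar_buffer procesar_buffer_alt
  have hb : (if buffer_acumulado ≠ [] then buffer_acumulado ++ buffer else buffer)
      = buffer_acumulado ++ buffer := by
    by_cases h : buffer_acumulado = [] <;> simp [h]
  have ha : (if buffer_acumulado ≠ [] then ([] : List String) else buffer_acumulado)
      = [] := by
    by_cases h : buffer_acumulado = [] <;> simp [h]
  simp only [hb, ha]
  set b := buffer_acumulado ++ buffer with hbdef
  have hmain := pbLoop_agree b b.length 0 0 [] (by omega) (le_refl 0) (by simp)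
  simp only [List.drop_zero, Nat.sub_zero, List.take_zero] at hmain
  obtain ⟨heq, hnodel, hle⟩ := hmain
  set r := pbLoopA b 0 0 [] with hr
  have htail : PySem.List.slice b (some (r.1 : Int)) none = b.drop r.1 :=
    PySem.List.slice_from_natCast b r.1
  rw [htail, heq]
  simp only
  have hnosp : " " ∉ b.drop r.1 := by
    intro h
    exact hnodel _ h (Or.inl rfl)
  by_cases hlt : r.1 < b.length
  · have hne : b.drop r.1 ≠ [] := by
      intro h
      have := List.length_drop (l := b) (i := r.1)
      rw [h] at this
      simp at this
      omega
    simp [hlt, hnosp, hne]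
  · have hnil : b.drop r.1 = [] := List.drop_eq_nil_of_le (by omega)
    simp [hlt, hnil]

-- ===== VERDICT (by name: the statement is the Claim_ definition above) =====
theorem procesar_buffer_spec : Claim_equal_procesar_buffer := by
  intro buffer buffer_acumulado _
  unfold Spec_procesar_buffer
  exact procesar_buffer_eq buffer buffer_acumulado
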